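-- pv_equiv track=rewrite | github.com/blooroot/uni-notes | notes/cicloV/DataStructures/week 9/labTime/Bag/bagVersion2.py | greedy_max_weight_ascendent
-- ===== SOURCE A (Python) =====
-- def greedy_max_weight_ascendent(weights, capacity):
--     # Ordenamos el array de weights
--     sorted_weights = sorted(weights)
--     # Inicialmente
--     total_weight = 0
--     # Vamos agregando los objetos m치s ligeros
--     for weight in sorted_weights:
--         if total_weight + weight <= capacity:
--             total_weight += weight
--         else:
--             break
--
--     return total_weight
-- ===== SOURCE B (Python) =====
-- def greedy_max_weight_ascendent(weights, capacity):
--     # Selection-based: no sorting pass at all. Repeatedly extract the minimum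
--     # of the remaining multiset and accumulate it while it still fits.
--     remaining = list(weights)
--     total = 0
--     while remaining:
--         m = min(remaining)
--         if total + m > capacity:
--             break
--         total += m
--         remaining.remove(m)
--     return total
-- ===== Notes on version B (the rewrite author's own statement) =====
-- stated objective: alternative
-- what changed: Replaces A's sort-then-scan (sorted() followed by a prefix accumulation with an early break) by selection: B never sorts, it repeatedly extracts the minimum of the remaining multiset with min()/remove() and accumulates while the next minimum still fits.
import Mathlib
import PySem

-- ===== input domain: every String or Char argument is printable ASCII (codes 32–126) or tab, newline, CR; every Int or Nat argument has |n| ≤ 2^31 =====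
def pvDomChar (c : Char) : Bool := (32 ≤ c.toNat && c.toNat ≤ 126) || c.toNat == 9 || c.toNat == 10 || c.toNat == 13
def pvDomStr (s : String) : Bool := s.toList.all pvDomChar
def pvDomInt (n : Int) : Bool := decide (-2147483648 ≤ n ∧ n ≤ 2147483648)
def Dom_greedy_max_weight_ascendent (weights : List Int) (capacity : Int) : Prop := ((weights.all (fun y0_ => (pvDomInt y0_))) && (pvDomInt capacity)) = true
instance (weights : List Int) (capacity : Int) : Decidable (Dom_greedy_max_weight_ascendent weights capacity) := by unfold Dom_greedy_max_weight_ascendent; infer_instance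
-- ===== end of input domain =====

-- B replaces A's sort-then-scan by selection: no sort, it repeatedly extracts the
-- minimum of the remaining multiset (min/remove) while it fits (objective: alternative).


-- ===== PORT A =====
-- the for-loop over sorted_weights with early break, state = total_weight
def pvLoopA (capacity : Int) (total : Int) : List Int → Int
  | [] => total
  | w :: t => if total + w ≤ capacity then pvLoopA capacity (total + w) t else total

def greedy_max_weight_ascendent (weights : List Int) (capacity : Int) : Int :=
  pvLoopA capacity 0 (PySem.List.sorted weights (fun x => x) false)

-- ===== PORT B =====
-- the while loop: state = (remaining, total); m = min(remaining); break if it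
-- does not fit; else total += m; remaining.remove(m)
def pvLoopB (capacity : Int) (total : Int) (remaining : List Int) : Int :=
  if hne : remaining = [] then total
  else
    match hm : PySem.List.min? remaining (fun x => x) with
    | none => total   -- unreachable: remaining ≠ []
    | some m =>
      if capacity < total + m then total
      else
        match hr : PySem.List.remove? remaining m with
        | none => total   -- unreachable: m ∈ remaining
        | some rest =>
          pvLoopB capacity (total + m) rest
termination_by remaining.length
decreasing_by
  have := PySem.List.remove?_eq_some_erase remaining m (PySem.List.min?_mem hm)
  rw [hr] at this
  have h2 : rest = remaining.erase m := by injection this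
  subst h2
  have hmem : m ∈ remaining := PySem.List.min?_mem hm
  have hpos : 0 < remaining.length := List.length_pos_of_mem hmem
  have := List.length_erase_of_mem hmem
  omega

def greedy_max_weight_ascendent_alt (weights : List Int) (capacity : Int) : Int :=
  pvLoopB capacity 0 weights

-- ===== PRECONDITION & SPEC =====
def Spec_greedy_max_weight_ascendent (weights : List Int) (capacity : Int) (out : Int) : Prop := out = greedy_max_weight_ascendent_alt weights capacity
instance (weights : List Int) (capacity : Int) (out : Int) : Decidable (Spec_greedy_max_weight_ascendent weights capacity out) := by unfold Spec_greedy_max_weight_ascendent; infer_instance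

-- ===== CLAIM (what is proved, stated in full; the proofs are below) =====
def Claim_equal_greedy_max_weight_ascendent : Prop := ∀ (weights : List Int) (capacity : Int), Dom_greedy_max_weight_ascendent weights capacity → Spec_greedy_max_weight_ascendent weights capacity (greedy_max_weight_ascendent weights capacity)

-- ===== LEMMAS AND PROOFS =====

-- the sorted list decomposes as its minimum followed by the sorted remainder
theorem sorted_eq_min_cons (l : List Int) (m : Int)
    (hm : PySem.List.min? l (fun x => x) = some m) :
    PySem.List.sorted l (fun x => x) false = m :: PySem.List.sorted (l.erase m) (fun x => x) false := by
  have hmem : m ∈ l := PySem.List.min?_mem hm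
  have hmin : ∀ y ∈ l, m ≤ y := fun y hy => PySem.List.min?_isMin hm y hy
  cases hs : PySem.List.sorted l (fun x => x) false with
  | nil =>
    have : l = [] := (PySem.List.sorted_eq_nil_iff l (fun x => x) false).mp hs
    subst this; simp at hmem
  | cons h t =>
    have hperm : (h :: t).Perm l := hs ▸ PySem.List.sorted_perm l _ false
    have hhmem : h ∈ l := hperm.mem_iff.mp (by simp)
    have hhead : ∀ y ∈ l, h ≤ y := PySem.List.key_head_sorted_le l (fun x => x) hs
    have hhm : h = m := le_antisymm (hhead m hmem) (hmin h hhmem)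
    subst hhm
    have hpw : (h :: t).Pairwise (· ≤ ·) := by
      have := PySem.List.sorted_pairwise l (fun x => x)
      rw [hs] at this; exact this
    have htperm : t.Perm (l.erase h) := (List.cons_perm_iff_perm_erase.mp hperm).2
    have : PySem.List.sorted (l.erase h) (fun x => x) false = t :=
      PySem.List.sorted_id_eq_of_perm_of_pairwise (l.erase h) t htperm (List.Pairwise.of_cons hpw)
    rw [this]

theorem loopA_eq_loopB (capacity total : Int) (rem : List Int) :
    pvLoopA capacity total (PySem.List.sorted rem (fun x => x) false) = pvLoopB capacity total rem := by
  fun_induction pvLoopB capacity total rem with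
  | case1 total =>
    simp [pvLoopA, PySem.List.sorted]
  | case2 total rem hne hm =>
    exact absurd ((PySem.List.min?_eq_none_iff rem (fun x => x)).mp hm) hne
  | case3 total rem hne m hm hc =>
    rw [sorted_eq_min_cons rem m hm]
    have : ¬ (total + m ≤ capacity) := by omega
    simp [pvLoopA, this]
  | case4 total rem hne m hm hc hr =>
    have hmem : m ∈ rem := PySem.List.min?_mem hm
    simp [PySem.List.remove?_eq_some_erase rem m hmem] at hr
  | case5 total rem hne m hm hc rest hr ih =>
    have hmem : m ∈ rem := PySem.List.min?_mem hm
    have hrest : rest = rem.erase m := by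
      have h0 := PySem.List.remove?_eq_some_erase rem m hmem
      rw [hr] at h0; exact Option.some.inj h0
    rw [sorted_eq_min_cons rem m hm]
    have hle : total + m ≤ capacity := by omega
    simp only [pvLoopA, hle, if_true]
    rw [← hrest]
    exact ih

-- ===== VERDICT (by name: the statement is the Claim_ definition above) =====
theorem greedy_max_weight_ascendent_spec : Claim_equal_greedy_max_weight_ascendent := by
  intro weights capacity _
  unfold Spec_greedy_max_weight_ascendent greedy_max_weight_ascendent greedy_max_weight_ascendent_alt
  exact loopA_eq_loopB capacity 0 weights
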